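-- pv_equiv track=rewrite | github.com/pypi-data/pypi-mirror-392 | packages/iflow-mcp_iac-memory-mcp-server/iflow_mcp_iac_memory_mcp_server-0.1.1.tar.gz/iflow_mcp_iac_memory_mcp_server-0.1.1/src/iac_memory_mcp_server/resources.py | extract_template_variables
-- ===== SOURCE A (Python) =====
-- from typing import Any, Dict, Optional
--
-- def extract_template_variables(uri: str, template: str) -> Optional[Dict[str, str]]:
--     """Extract variables from a URI based on a template pattern.
--
--     Args:
--         uri: The actual URI to parse
--         template: The template pattern containing {variable} placeholders
--
--     Returns:
--         Dictionary of variable names to values, or None if URI doesn't match template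
--     """
--     # Convert template into regex pattern
--     pattern_parts = template.split("/")
--     uri_parts = uri.split("/")
--
--     if len(pattern_parts) != len(uri_parts):
--         return None
--
--     variables = {}
--     for template_part, uri_part in zip(pattern_parts, uri_parts):
--         if template_part.startswith("{") and template_part.endswith("}"):
--             var_name = template_part[1:-1]
--             variables[var_name] = uri_part
--         elif template_part != uri_part:
--             return None
--
--     return variables
-- ===== SOURCE B (Python) =====
-- def extract_template_variables(uri, template):
--     """Single character-level scan: consume one segment of uri and template at a
--     time with two index pointers; no split lists are ever built."""
--     variables = {}
--     i = j = 0
--     n, m = len(uri), len(template)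
--     while True:
--         k = j
--         while k < m and template[k] != "/":
--             k += 1
--         seg = template[j:k]
--         l = i
--         while l < n and uri[l] != "/":
--             l += 1
--         useg = uri[i:l]
--         if len(seg) >= 2 and seg[0] == "{" and seg[-1] == "}":
--             variables[seg[1:-1]] = useg
--         elif seg != useg:
--             return None
--         t_end = k >= m
--         u_end = l >= n
--         if t_end and u_end:
--             return variables
--         if t_end != u_end:
--             return None
--         j = k + 1
--         i = l + 1
-- ===== Notes on version B (the rewrite author's own statement) =====
-- stated objective: alternative
-- what changed: B replaces A's split-both-strings-into-part-lists + upfront length check + zip loop with a single character-level two-pointer scan that consumes one segment of uri and template at a time and never materialises the part lists.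
import Mathlib
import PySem

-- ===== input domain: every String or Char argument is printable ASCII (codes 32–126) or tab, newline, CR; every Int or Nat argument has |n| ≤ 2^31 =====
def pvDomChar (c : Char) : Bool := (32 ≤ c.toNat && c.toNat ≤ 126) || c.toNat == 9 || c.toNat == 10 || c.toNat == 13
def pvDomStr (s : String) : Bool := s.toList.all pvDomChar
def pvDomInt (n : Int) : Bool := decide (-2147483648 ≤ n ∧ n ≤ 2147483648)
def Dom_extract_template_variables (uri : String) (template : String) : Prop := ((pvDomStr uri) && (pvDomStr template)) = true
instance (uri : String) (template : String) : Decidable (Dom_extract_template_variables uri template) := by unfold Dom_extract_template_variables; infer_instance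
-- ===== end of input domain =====

-- B replaces A's split-into-part-lists + length check + zip loop by a single
-- character-level scan consuming one segment of uri and template at a time
-- (objective: alternative; same asymptotic cost, no part lists materialised).

-- ===== PORT A =====
-- the for-loop over zip(pattern_parts, uri_parts) with early `return None`
def pvALoop : List (List Char × List Char) → PySem.Dict (List Char) (List Char) →
    Option (PySem.Dict (List Char) (List Char))
  | [], vars0 => some vars0
  | (tp, up) :: rest, vars0 =>
    if PySem.Chars.startswith tp ['{'] && PySem.Chars.endswith tp ['}'] then
      pvALoop rest (vars0.insert (PySem.Chars.slice tp (some 1) (some (-1))) up)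
    else if tp ≠ up then none
    else pvALoop rest vars0

def extract_template_variables (uri : String) (template : String) :
    Option (List (String × String)) :=
  let pattern_parts := PySem.Chars.splitOn template.toList ['/']
  let uri_parts := PySem.Chars.splitOn uri.toList ['/']
  if pattern_parts.length ≠ uri_parts.length then none
  else (pvALoop (pattern_parts.zip uri_parts) ⟨[]⟩).map
    (fun d => d.items.map (fun p => (String.mk p.1, String.mk p.2)))

-- ===== PORT B =====
-- Source B's while-loop: scan one segment of template and of uri (the inner
-- `while … != "/"` index loops are the takeWhile/dropWhile pair), classify the
-- template segment, then advance both pointers past the '/' or stop.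
def pvBGo (u t : List Char) (vars0 : PySem.Dict (List Char) (List Char)) :
    Option (PySem.Dict (List Char) (List Char)) :=
  let seg := t.takeWhile (· ≠ '/')
  let useg := u.takeWhile (· ≠ '/')
  let step : Option (PySem.Dict (List Char) (List Char)) :=
    if 2 ≤ seg.length ∧ PySem.List.pyGet? seg 0 = some '{' ∧ PySem.List.pyGet? seg (-1) = some '}' then
      some (vars0.insert (PySem.Chars.slice seg (some 1) (some (-1))) useg)
    else if seg = useg then some vars0
    else none
  match step with
  | none => none
  | some vars' =>
    if ht : t.dropWhile (· ≠ '/') = [] then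
      (if u.dropWhile (· ≠ '/') = [] then some vars' else none)
    else if _hu : u.dropWhile (· ≠ '/') = [] then none
    else pvBGo (u.dropWhile (· ≠ '/')).tail (t.dropWhile (· ≠ '/')).tail vars'
termination_by t.length
decreasing_by
  have h1 : (t.dropWhile (· ≠ '/')).length ≤ t.length := (List.dropWhile_sublist _).length_le
  have h2 : (t.dropWhile (· ≠ '/')).length ≠ 0 := fun hl => ht (List.length_eq_zero_iff.mp hl)
  rw [List.length_tail]; omega

def extract_template_variables_alt (uri : String) (template : String) :
    Option (List (String × String)) :=
  (pvBGo uri.toList template.toList ⟨[]⟩).map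
    (fun d => d.items.map (fun p => (String.mk p.1, String.mk p.2)))

-- ===== PRECONDITION & SPEC =====
def Spec_extract_template_variables (uri : String) (template : String) (out : Option (List (String × String))) : Prop := out = extract_template_variables_alt uri template
instance (uri : String) (template : String) (out : Option (List (String × String))) : Decidable (Spec_extract_template_variables uri template out) := by unfold Spec_extract_template_variables; infer_instance

-- ===== CLAIM (what is proved, stated in full; the proofs are below) =====
def Claim_equal_extract_template_variables : Prop := ∀ (uri : String) (template : String), Dom_extract_template_variables uri template → Spec_extract_template_variables uri template (extract_template_variables uri template)

-- ===== LEMMAS AND PROOFS =====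

-- `s.split("/")` as a segment-at-a-time recursion
def pvSegSplit (l : List Char) : List (List Char) :=
  l.takeWhile (· ≠ '/') ::
    (if h : l.dropWhile (· ≠ '/') = [] then []
     else pvSegSplit (l.dropWhile (· ≠ '/')).tail)
termination_by l.length
decreasing_by
  have h1 : (l.dropWhile (· ≠ '/')).length ≤ l.length := (List.dropWhile_sublist _).length_le
  have h2 : (l.dropWhile (· ≠ '/')).length ≠ 0 := fun hl => h (List.length_eq_zero_iff.mp hl)
  rw [List.length_tail]; omega

lemma pvSegSplit_def (l : List Char) : pvSegSplit l =
    l.takeWhile (· ≠ '/') ::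
      (if _h : l.dropWhile (· ≠ '/') = [] then []
       else pvSegSplit (l.dropWhile (· ≠ '/')).tail) := by
  conv_lhs => rw [pvSegSplit]

lemma pvSegSplit_length_pos (l : List Char) : 0 < (pvSegSplit l).length := by
  rw [pvSegSplit_def]
  simp only [List.length_cons]
  omega

lemma pvSegSplit_cons_tail (l : List Char) :
    pvSegSplit l = l.takeWhile (· ≠ '/') :: (pvSegSplit l).tail := by
  rw [pvSegSplit_def l, List.tail_cons]

lemma pvSegSplit_tail_cons (x : Char) (rest : List Char) (hx : x ≠ '/') :
    (pvSegSplit (x :: rest)).tail = (pvSegSplit rest).tail := by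
  rw [pvSegSplit_def (x :: rest), pvSegSplit_def rest, List.tail_cons, List.tail_cons]
  have hd : List.dropWhile (fun c => decide (c ≠ '/')) (x :: rest)
      = List.dropWhile (fun c => decide (c ≠ '/')) rest := by
    rw [List.dropWhile_cons]; simp [hx]
  simp only [hd]

lemma pvGoSpec : ∀ (n : Nat) (l : List Char), l.length < n →
    ∀ (fuel : Nat) (cur : List Char) (acc : List (List Char)), l.length < fuel →
    PySem.Chars.splitOn.go ['/'] fuel l cur acc
      = acc.reverse ++ (cur.reverse ++ l.takeWhile (· ≠ '/')) :: (pvSegSplit l).tail := by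
  intro n
  induction n with
  | zero => intro l hl; omega
  | succ n ih =>
    intro l hl fuel cur acc hf
    match l, fuel with
    | _, 0 => omega
    | [], fuel + 1 =>
      rw [PySem.Chars.splitOn.go]
      · rw [pvSegSplit_def]; simp
      · omega
    | x :: rest, fuel + 1 =>
      by_cases hx : x = '/'
      · subst hx
        rw [PySem.Chars.splitOn.go]
        simp only [List.isPrefixOf, BEq.rfl, Bool.and_self, if_pos]
        rw [show List.drop (['/'] : List Char).length ('/' :: rest) = rest from rfl]
        rw [ih rest (by simp at hl ⊢; omega) fuel [] (cur.reverse :: acc) (by simp at hf ⊢; omega)]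
        rw [pvSegSplit_def ('/' :: rest)]
        have htk : List.takeWhile (fun c => decide (c ≠ '/')) ('/' :: rest) = [] := by
          rw [List.takeWhile_cons]; simp
        have hd : List.dropWhile (fun c => decide (c ≠ '/')) ('/' :: rest) = '/' :: rest := by
          rw [List.dropWhile_cons]; simp
        simp only [htk, hd]
        rw [dif_neg (List.cons_ne_nil '/' rest)]
        simp only [List.tail_cons, List.reverse_cons, List.reverse_nil, List.nil_append,
          List.append_nil, List.append_assoc, List.cons_append, List.singleton_append]
        rw [← pvSegSplit_cons_tail rest]
      · rw [PySem.Chars.splitOn.go]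
        have : ['/'].isPrefixOf (x :: rest) = false := by
          simp [List.isPrefixOf]; exact fun h => hx h.symm
        rw [this]
        simp only [Bool.false_eq_true, if_false]
        rw [ih rest (by simp at hl ⊢; omega) fuel (x :: cur) acc (by simp at hf ⊢; omega)]
        rw [pvSegSplit_tail_cons x rest hx]
        simp [List.takeWhile_cons, hx]

lemma pvSplitOn_eq (l : List Char) : PySem.Chars.splitOn l ['/'] = pvSegSplit l := by
  rw [PySem.Chars.splitOn,
    pvGoSpec (l.length + 1) l (by omega) (l.length + 1) [] [] (by omega)]
  simpa using (pvSegSplit_cons_tail l).symm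

lemma pvGetZero (l : List Char) : PySem.List.pyGet? l 0 = l.head? := by
  simp [PySem.List.pyGet?, PySem.List.pyIdx?]
  cases l <;> simp

lemma pvGetNegOne (l : List Char) (h : l ≠ []) : PySem.List.pyGet? l (-1) = l.getLast? := by
  have hn : 1 ≤ l.length := List.length_pos_iff.mpr h
  rw [PySem.List.pyGet?, PySem.List.pyIdx?]
  rw [if_neg (by omega), if_pos (by omega)]
  simp [List.getLast?_eq_getElem?]

lemma pvHeadPrefix (c : Char) (l : List Char) : [c] <+: l ↔ l.head? = some c := by
  cases l <;> simp [List.cons_prefix_cons, eq_comm]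

lemma pvLastSuffix (c : Char) (l : List Char) : [c] <:+ l ↔ l.getLast? = some c := by
  rw [← List.reverse_prefix, ← List.head?_reverse]
  cases h : l.reverse <;> simp [List.cons_prefix_cons, eq_comm]

lemma pvClassify (seg : List Char) :
    (PySem.Chars.startswith seg ['{'] && PySem.Chars.endswith seg ['}']) = true
      ↔ (2 ≤ seg.length ∧ PySem.List.pyGet? seg 0 = some '{' ∧ PySem.List.pyGet? seg (-1) = some '}') := by
  rw [Bool.and_eq_true]
  constructor
  · rintro ⟨hs, he⟩
    have h1 := (pvHeadPrefix _ _).mp ((PySem.Chars.startswith_iff _ _).mp hs)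
    have h2 := (pvLastSuffix _ _).mp ((PySem.Chars.endswith_iff _ _).mp he)
    have hne : seg ≠ [] := by intro e; subst e; simp at h1
    refine ⟨?_, by rw [pvGetZero]; exact h1, by rw [pvGetNegOne _ hne]; exact h2⟩
    rcases seg with _ | ⟨a, rest⟩
    · exact absurd rfl hne
    rcases rest with _ | ⟨b, t⟩
    · simp at h1 h2; subst h1; exact absurd h2 (by decide)
    · simp only [List.length_cons]; omega
  · rintro ⟨hlen, h1, h2⟩
    have hne : seg ≠ [] := by intro e; subst e; simp at hlen
    rw [pvGetZero] at h1; rw [pvGetNegOne _ hne] at h2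
    exact ⟨(PySem.Chars.startswith_iff _ _).mpr ((pvHeadPrefix _ _).mpr h1),
           (PySem.Chars.endswith_iff _ _).mpr ((pvLastSuffix _ _).mpr h2)⟩

lemma pvDropTailLt (l : List Char) (h : l.dropWhile (· ≠ '/') ≠ []) :
    (l.dropWhile (· ≠ '/')).tail.length < l.length := by
  have h1 : (l.dropWhile (· ≠ '/')).length ≤ l.length := (List.dropWhile_sublist _).length_le
  have h2 : (l.dropWhile (· ≠ '/')).length ≠ 0 := fun hl => h (List.length_eq_zero_iff.mp hl)
  rw [List.length_tail]; omega

lemma pvBGo_eq : ∀ (n : Nat) (t u : List Char)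
    (vars0 : PySem.Dict (List Char) (List Char)), t.length < n →
    pvBGo u t vars0 =
      (if (pvSegSplit t).length = (pvSegSplit u).length
       then pvALoop ((pvSegSplit t).zip (pvSegSplit u)) vars0 else none) := by
  intro n
  induction n with
  | zero => intro t u vars0 hl; omega
  | succ n ih =>
    intro t u vars0 hl
    rw [pvBGo, pvSegSplit_def t, pvSegSplit_def u]
    by_cases hc : 2 ≤ (t.takeWhile (· ≠ '/')).length ∧
        PySem.List.pyGet? (t.takeWhile (· ≠ '/')) 0 = some '{' ∧
        PySem.List.pyGet? (t.takeWhile (· ≠ '/')) (-1) = some '}'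
    · have hca : (PySem.Chars.startswith (t.takeWhile (· ≠ '/')) ['{'] &&
          PySem.Chars.endswith (t.takeWhile (· ≠ '/')) ['}']) = true := (pvClassify _).mpr hc
      simp only [if_pos hc]
      by_cases ht : t.dropWhile (· ≠ '/') = []
      · by_cases hu : u.dropWhile (· ≠ '/') = []
        · rw [dif_pos ht, if_pos hu, dif_pos ht, dif_pos hu,
            if_pos (by simp only [List.length_cons, List.length_nil])]
          rw [List.zip_cons_cons]
          simp only [List.zip_nil_left]
          simp only [pvALoop]
          rw [if_pos hca]
        · rw [dif_pos ht, if_neg hu, dif_pos ht, dif_neg hu]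
          rw [if_neg (by
            have := pvSegSplit_length_pos ((u.dropWhile (· ≠ '/')).tail)
            simp only [List.length_cons, List.length_nil]; omega)]
      · by_cases hu : u.dropWhile (· ≠ '/') = []
        · rw [dif_neg ht, dif_pos hu, dif_neg ht, dif_pos hu]
          rw [if_neg (by
            have := pvSegSplit_length_pos ((t.dropWhile (· ≠ '/')).tail)
            simp only [List.length_cons, List.length_nil]; omega)]
        · rw [dif_neg ht, dif_neg hu, dif_neg ht, dif_neg hu]
          rw [ih _ _ _ (by have := pvDropTailLt t ht; omega)]
          by_cases hlen : (pvSegSplit ((t.dropWhile (· ≠ '/')).tail)).length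
              = (pvSegSplit ((u.dropWhile (· ≠ '/')).tail)).length
          · rw [if_pos hlen, if_pos (by simp only [List.length_cons]; omega)]
            rw [List.zip_cons_cons]
            simp only [pvALoop]
            rw [if_pos hca]
          · rw [if_neg hlen, if_neg (by simp only [List.length_cons]; omega)]
    · have hca : ¬ ((PySem.Chars.startswith (t.takeWhile (· ≠ '/')) ['{'] &&
          PySem.Chars.endswith (t.takeWhile (· ≠ '/')) ['}']) = true) :=
        fun h => hc ((pvClassify _).mp h)
      simp only [if_neg hc]
      by_cases heq : t.takeWhile (· ≠ '/') = u.takeWhile (· ≠ '/')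
      · simp only [if_pos heq]
        by_cases ht : t.dropWhile (· ≠ '/') = []
        · by_cases hu : u.dropWhile (· ≠ '/') = []
          · rw [dif_pos ht, if_pos hu, dif_pos ht, dif_pos hu,
              if_pos (by simp only [List.length_cons, List.length_nil])]
            rw [List.zip_cons_cons]
            simp only [List.zip_nil_left]
            simp only [pvALoop]
            rw [if_neg hca, if_neg (not_not_intro heq)]
          · rw [dif_pos ht, if_neg hu, dif_pos ht, dif_neg hu]
            rw [if_neg (by
              have := pvSegSplit_length_pos ((u.dropWhile (· ≠ '/')).tail)
              simp only [List.length_cons, List.length_nil]; omega)]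
        · by_cases hu : u.dropWhile (· ≠ '/') = []
          · rw [dif_neg ht, dif_pos hu, dif_neg ht, dif_pos hu]
            rw [if_neg (by
              have := pvSegSplit_length_pos ((t.dropWhile (· ≠ '/')).tail)
              simp only [List.length_cons, List.length_nil]; omega)]
          · rw [dif_neg ht, dif_neg hu, dif_neg ht, dif_neg hu]
            rw [ih _ _ _ (by have := pvDropTailLt t ht; omega)]
            by_cases hlen : (pvSegSplit ((t.dropWhile (· ≠ '/')).tail)).length
                = (pvSegSplit ((u.dropWhile (· ≠ '/')).tail)).length
            · rw [if_pos hlen, if_pos (by simp only [List.length_cons]; omega)]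
              rw [List.zip_cons_cons]
              simp only [pvALoop]
              rw [if_neg hca, if_neg (not_not_intro heq)]
            · rw [if_neg hlen, if_neg (by simp only [List.length_cons]; omega)]
      · simp only [if_neg heq]
        by_cases hlen : (t.takeWhile (· ≠ '/') ::
              (if _h : t.dropWhile (· ≠ '/') = [] then []
               else pvSegSplit ((t.dropWhile (· ≠ '/')).tail))).length
            = (u.takeWhile (· ≠ '/') ::
              (if _h : u.dropWhile (· ≠ '/') = [] then []
               else pvSegSplit ((u.dropWhile (· ≠ '/')).tail))).length
        · rw [if_pos hlen, List.zip_cons_cons]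
          simp only [pvALoop]
          rw [if_neg hca, if_pos heq]
        · rw [if_neg hlen]

-- ===== VERDICT (by name: the statement is the Claim_ definition above) =====
theorem extract_template_variables_spec : Claim_equal_extract_template_variables := by
  intro uri template _
  unfold Spec_extract_template_variables
  unfold extract_template_variables extract_template_variables_alt
  rw [pvBGo_eq (template.toList.length + 1) _ _ _ (by omega)]
  rw [pvSplitOn_eq, pvSplitOn_eq]
  by_cases h : (pvSegSplit template.toList).length = (pvSegSplit uri.toList).length
  · simp [h]
  · simp [h]
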